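-- pv_equiv track=rewrite | github.com/ramongonze/pc | gabaritos/gabarito-aula15.py | exercicio_14_3_9
-- ===== SOURCE A (Python) =====
-- def exercicio_14_3_9(ini, fim):
-- 	D = dict()
-- 	for i in range(ini, fim+1):
-- 		for div in range(9,0,-1):
-- 			if i%div == 0:
-- 				D[i] = div
-- 				break
-- 	return D
-- ===== SOURCE B (Python) =====
-- def exercicio_14_3_9(ini, fim):
--     D = {}
--     for d in range(1, 10):
--         start = ((ini + d - 1) // d) * d
--         for m in range(start, fim + 1, d):
--             D[m] = d
--     return D
-- ===== Notes on version B (the rewrite author's own statement) =====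
-- stated objective: alternative
-- what changed: Replaces A's per-element descending search for the largest divisor (9 trial divisions per key) by a divisor sieve: one ascending pass per divisor d in 1..9 that marks every multiple of d in [ini, fim], so later (larger) divisors overwrite and each key ends holding its largest divisor; insertion order is identical because d=1 inserts all keys first.
import Mathlib
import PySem

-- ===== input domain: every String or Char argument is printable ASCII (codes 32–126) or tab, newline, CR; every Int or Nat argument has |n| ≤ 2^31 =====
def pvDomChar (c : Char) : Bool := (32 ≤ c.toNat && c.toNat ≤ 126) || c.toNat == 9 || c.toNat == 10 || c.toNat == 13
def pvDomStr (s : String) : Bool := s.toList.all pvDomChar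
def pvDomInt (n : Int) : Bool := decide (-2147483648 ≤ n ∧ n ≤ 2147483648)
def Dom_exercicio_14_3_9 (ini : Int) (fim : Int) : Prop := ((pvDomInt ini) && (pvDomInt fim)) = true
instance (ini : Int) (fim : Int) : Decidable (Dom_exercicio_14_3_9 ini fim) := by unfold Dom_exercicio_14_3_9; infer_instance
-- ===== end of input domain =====

-- B replaces A's per-element descending divisor search by a divisor sieve (one pass per divisor 1..9,
-- marking its multiples in ascending order); same returned dict, including insertion order.


-- ===== PORT A =====
-- inner loop: 'for div in range(9,0,-1): if i % div == 0: D[i] = div; break'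
def aInner (i : Int) (divs : List Int) (d : PySem.Dict Int Int) : PySem.Dict Int Int :=
  match divs with
  | [] => d
  | dv :: rest => if PySem.Int.mod i dv = 0 then d.insert i dv else aInner i rest d

def exercicio_14_3_9 (ini : Int) (fim : Int) : List (Int × Int) :=
  ((PySem.List.pyRange ini (fim + 1) 1).foldl
    (fun d i => aInner i (PySem.List.pyRange 9 0 (-1)) d) PySem.Dict.empty).items

-- ===== PORT B =====
def exercicio_14_3_9_alt (ini : Int) (fim : Int) : List (Int × Int) :=
  ((PySem.List.pyRange 1 10 1).foldl
    (fun d dv =>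
      (PySem.List.pyRange (PySem.Int.floordiv (ini + dv - 1) dv * dv) (fim + 1) dv).foldl
        (fun d m => d.insert m dv) d)
    PySem.Dict.empty).items

-- ===== PRECONDITION & SPEC =====
def Spec_exercicio_14_3_9 (ini : Int) (fim : Int) (out : List (Int × Int)) : Prop := out = exercicio_14_3_9_alt ini fim
instance (ini : Int) (fim : Int) (out : List (Int × Int)) : Decidable (Spec_exercicio_14_3_9 ini fim out) := by unfold Spec_exercicio_14_3_9; infer_instance

-- ===== CLAIM (what is proved, stated in full; the proofs are below) =====
def Claim_equal_exercicio_14_3_9 : Prop := ∀ (ini : Int) (fim : Int), Dom_exercicio_14_3_9 ini fim → Spec_exercicio_14_3_9 ini fim (exercicio_14_3_9 ini fim)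

-- ===== LEMMAS AND PROOFS =====

-- the largest divisor of i among 1..9 (first hit of A's descending search)
def gfun (i : Int) : Int :=
  if PySem.Int.mod i 9 = 0 then 9 else if PySem.Int.mod i 8 = 0 then 8 else
  if PySem.Int.mod i 7 = 0 then 7 else if PySem.Int.mod i 6 = 0 then 6 else
  if PySem.Int.mod i 5 = 0 then 5 else if PySem.Int.mod i 4 = 0 then 4 else
  if PySem.Int.mod i 3 = 0 then 3 else if PySem.Int.mod i 2 = 0 then 2 else 1

lemma aInner_eq (i : Int) (d : PySem.Dict Int Int) :
    aInner i (PySem.List.pyRange 9 0 (-1)) d = d.insert i (gfun i) := by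
  have h9 : PySem.List.pyRange 9 0 (-1) = [9,8,7,6,5,4,3,2,1] := by decide
  have h1 : PySem.Int.mod i 1 = 0 := Int.fmod_one i
  rw [h9]
  simp only [aInner, gfun, h1]
  split_ifs <;> rfl

-- A's dict items: the range mapped through gfun
lemma a_items (ini fim : Int) :
    exercicio_14_3_9 ini fim
      = (PySem.List.pyRange ini (fim + 1) 1).map (fun i => (i, gfun i)) := by
  unfold exercicio_14_3_9
  have hc : ∀ (d : PySem.Dict Int Int) (i : Int),
      (fun d i => aInner i (PySem.List.pyRange 9 0 (-1)) d) d i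
        = (fun d i => d.insert i (gfun i)) d i := fun d i => aInner_eq i d
  rw [funext fun d => funext fun i => hc d i]
  have hfresh := PySem.Dict.items_foldl_insert_fresh (PySem.List.pyRange ini (fim + 1) 1)
      id gfun PySem.Dict.empty
      (fun a _ => PySem.Dict.contains_empty a)
      (by simpa using PySem.List.nodup_pyRange_one ini (fim + 1))
  simpa [PySem.Dict.empty] using hfresh

-- one insert of a key already present in a range-shaped dict
lemma insert_rangeMap (lo hi v m : Int) (f : Int → Int) (d : PySem.Dict Int Int)
    (hd : d.items = (PySem.List.pyRange lo hi 1).map (fun i => (i, f i)))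
    (hm : m ∈ PySem.List.pyRange lo hi 1) :
    (d.insert m v).items
      = (PySem.List.pyRange lo hi 1).map (fun i => (i, if i = m then v else f i)) := by
  have hk : d.keys = PySem.List.pyRange lo hi 1 := by
    show d.items.map (·.1) = _
    rw [hd]; simp [Function.comp_def]
  have hc : d.contains m = true := by
    rw [PySem.Dict.contains_iff_mem_keys, hk]; exact hm
  rw [PySem.Dict.items_insert_of_contains d v hc, hd, List.map_map]
  apply List.map_congr_left
  intro i _
  by_cases h : i = m
  · subst h; simp
  · simp [h]

-- a whole pass of inserts (same value v) over keys inside the range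
lemma pass_rangeMap (lo hi v : Int) (M : List Int)
    (hM : ∀ m ∈ M, m ∈ PySem.List.pyRange lo hi 1) :
    ∀ (f : Int → Int) (d : PySem.Dict Int Int),
      d.items = (PySem.List.pyRange lo hi 1).map (fun i => (i, f i)) →
      (M.foldl (fun d m => d.insert m v) d).items
        = (PySem.List.pyRange lo hi 1).map (fun i => (i, if i ∈ M then v else f i)) := by
  induction M with
  | nil => intro f d hd; simpa using hd
  | cons m M' ih =>
      intro f d hd
      have hstep := insert_rangeMap lo hi v m f d hd (hM m (List.mem_cons_self))
      have := ih (fun m' hm' => hM m' (List.mem_cons_of_mem _ hm'))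
        (fun i => if i = m then v else f i) (d.insert m v) hstep
      rw [List.foldl_cons, this]
      apply List.map_congr_left
      intro i _
      by_cases h1 : i = m <;> by_cases h2 : i ∈ M' <;> simp [h1, h2]

-- the first multiple of dv at or above ini: ini ≤ start ≤ ini + dv - 1
lemma start_bounds (ini dv : Int) (hdv : 0 < dv) :
    ini ≤ PySem.Int.floordiv (ini + dv - 1) dv * dv ∧
    PySem.Int.floordiv (ini + dv - 1) dv * dv ≤ ini + dv - 1 := by
  have hqe : PySem.Int.floordiv (ini + dv - 1) dv = (ini + dv - 1) / dv := by
    show Int.fdiv _ _ = _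
    rw [Int.fdiv_eq_ediv]; simp [le_of_lt hdv]
  rw [hqe]
  have h1 := Int.mul_ediv_add_emod (ini + dv - 1) dv
  have h2 := Int.emod_nonneg (ini + dv - 1) (ne_of_gt hdv)
  have h3 := Int.emod_lt_of_pos (ini + dv - 1) hdv
  constructor <;> nlinarith [h1]

-- membership in B's multiples range ⟺ divisibility, for keys of the main range
lemma mem_mults (ini fim dv : Int) (hdv : 0 < dv) (i : Int)
    (hi : i ∈ PySem.List.pyRange ini (fim + 1) 1) :
    (i ∈ PySem.List.pyRange (PySem.Int.floordiv (ini + dv - 1) dv * dv) (fim + 1) dv)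
      ↔ PySem.Int.mod i dv = 0 := by
  obtain ⟨hlo, hhi⟩ := PySem.List.mem_pyRange_one.mp hi
  obtain ⟨hql, hqu⟩ := start_bounds ini dv hdv
  set q := PySem.Int.floordiv (ini + dv - 1) dv with hq
  rw [PySem.List.mem_pyRange_iff_of_pos hdv]
  constructor
  · rintro ⟨hs, -, k, hk⟩
    exact Int.fmod_eq_zero_of_dvd ⟨q + k, by linear_combination hk⟩
  · intro hmod
    obtain ⟨k, hk⟩ := Int.dvd_of_fmod_eq_zero hmod
    refine ⟨?_, hhi, ⟨k - q, by linear_combination hk⟩⟩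
    have hlt : dv * (q - 1) < dv * k := by
      have e : dv * (q - 1) = q * dv - dv := by ring
      rw [e, ← hk]; linarith
    have hqk : q ≤ k := by
      have := lt_of_mul_lt_mul_left hlt (le_of_lt hdv); omega
    have : dv * q ≤ dv * k := mul_le_mul_of_nonneg_left hqk (le_of_lt hdv)
    have hcm : q * dv = dv * q := mul_comm q dv
    linarith [hk]

-- the function a sieve over the divisor list L leaves at each key
def sieveF (L : List Int) (f : Int → Int) : Int → Int :=
  match L with
  | [] => f
  | dv :: rest => sieveF rest (fun i => if PySem.Int.mod i dv = 0 then dv else f i)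

lemma sieve_passes (ini fim : Int) (L : List Int) (hL : ∀ dv ∈ L, 0 < dv) :
    ∀ (f : Int → Int) (d : PySem.Dict Int Int),
      d.items = (PySem.List.pyRange ini (fim + 1) 1).map (fun i => (i, f i)) →
      (L.foldl (fun d dv =>
          (PySem.List.pyRange (PySem.Int.floordiv (ini + dv - 1) dv * dv) (fim + 1) dv).foldl
            (fun d m => d.insert m dv) d) d).items
        = (PySem.List.pyRange ini (fim + 1) 1).map (fun i => (i, sieveF L f i)) := by
  induction L with
  | nil => intro f d hd; simpa [sieveF] using hd
  | cons dv rest ih =>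
      intro f d hd
      have hdv := hL dv List.mem_cons_self
      have hM : ∀ m ∈ PySem.List.pyRange (PySem.Int.floordiv (ini + dv - 1) dv * dv) (fim + 1) dv,
          m ∈ PySem.List.pyRange ini (fim + 1) 1 := by
        intro m hm
        obtain ⟨hs, hmf, hdvd⟩ := (PySem.List.mem_pyRange_iff_of_pos hdv m).mp hm
        rw [PySem.List.mem_pyRange_one]
        have hql := (start_bounds ini dv hdv).1
        exact ⟨le_trans hql hs, hmf⟩
      have hpass := pass_rangeMap ini (fim + 1) dv _ hM f d hd
      have hmid : (PySem.List.pyRange ini (fim + 1) 1).map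
            (fun i => (i, if i ∈ PySem.List.pyRange (PySem.Int.floordiv (ini + dv - 1) dv * dv) (fim + 1) dv then dv else f i))
          = (PySem.List.pyRange ini (fim + 1) 1).map
            (fun i => (i, if PySem.Int.mod i dv = 0 then dv else f i)) := by
        apply List.map_congr_left
        intro i hi
        simp only [mem_mults ini fim dv hdv i hi]
      rw [List.foldl_cons, ih (fun d hd => hL d (List.mem_cons_of_mem _ hd)) _ _ (hpass.trans hmid)]
      rfl

lemma b_items (ini fim : Int) :
    exercicio_14_3_9_alt ini fim
      = (PySem.List.pyRange ini (fim + 1) 1).map (fun i => (i, gfun i)) := by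
  unfold exercicio_14_3_9_alt
  have h10 : PySem.List.pyRange 1 10 1 = 1 :: [2,3,4,5,6,7,8,9] := by decide
  rw [h10, List.foldl_cons]
  -- the dv = 1 pass fills the whole range with value 1
  have hstart : PySem.Int.floordiv (ini + 1 - 1) 1 * 1 = ini := by
    show Int.fdiv _ _ * _ = _
    rw [Int.fdiv_one]; ring
  rw [hstart]
  have hfresh := PySem.Dict.items_foldl_insert_fresh (PySem.List.pyRange ini (fim + 1) 1)
      id (fun _ => (1 : Int)) PySem.Dict.empty
      (fun a _ => PySem.Dict.contains_empty a)
      (by simpa using PySem.List.nodup_pyRange_one ini (fim + 1))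
  have hbase : ((PySem.List.pyRange ini (fim + 1) 1).foldl
        (fun d m => d.insert m (1 : Int)) PySem.Dict.empty).items
      = (PySem.List.pyRange ini (fim + 1) 1).map (fun i => (i, (fun _ => (1 : Int)) i)) := by
    simpa [PySem.Dict.empty] using hfresh
  rw [sieve_passes ini fim [2,3,4,5,6,7,8,9] (by decide) _ _ hbase]
  apply List.map_congr_left
  intro i _
  have : sieveF [2,3,4,5,6,7,8,9] (fun _ => (1 : Int)) i = gfun i := by
    simp only [sieveF, gfun]
  rw [this]

-- ===== VERDICT (by name: the statement is the Claim_ definition above) =====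
theorem exercicio_14_3_9_spec : Claim_equal_exercicio_14_3_9 := by
  intro ini fim _
  show exercicio_14_3_9 ini fim = exercicio_14_3_9_alt ini fim
  rw [a_items, b_items]
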